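-- pv_equiv track=rewrite | github.com/bohyunshin/Algorithm_training | 모비스/3.py | bfs
-- ===== SOURCE A (Python) =====
-- from collections import deque
--
-- def bfs(B):
--     n = len(B)
--     FLAG = B[0] & B[1]
--     for i in range(2,len(B)):
--         FLAG = FLAG & B[i]
--     if FLAG == 0:
--         return 0
--     q = deque()
--     q.append(tuple(B))
--     visited = {}
--     visited[tuple(B)] = 0
--     while q:
--         B = q.popleft()
--         cnt = visited[B]
--         B = list(B)
--         for i in range(len(B)):
--             B[i] -= 1
--             FLAG = B[0] & B[1]
--             if FLAG == 0:
--                 return cnt + 1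
--             for j in range(2,len(B)):
--                 FLAG = FLAG & B[j]
--                 if FLAG == 0:
--                     return cnt + 1
--             q.append(tuple(B))
--             visited[tuple(B)] = cnt + 1
--             B[i] += 1
-- ===== SOURCE B (Python) =====
-- def bfs(B):
--     n = len(B)
--
--     def feasible(i, budget, acc):
--         # can elements i.. absorb exactly `budget` single decrements so that
--         # acc AND (decremented elements i..) == 0 ?
--         if i == n:
--             return budget == 0 and acc == 0
--         return any(feasible(i + 1, budget - d, acc & (B[i] - d))
--                    for d in range(budget + 1))
--
--     L = 0
--     while True:
--         if feasible(0, L, -1):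
--             return L
--         L += 1
-- ===== Notes on version B (the rewrite author's own statement) =====
-- stated objective: alternative
-- what changed: A's breadth-first search over whole array states (deque of tuples plus a visited dict, no dedup) is replaced by iterative deepening on the total decrement count L, testing each L with a recursive DFS over the compositions of L among the array elements; no queue, no dict, no state tuples.
import Mathlib
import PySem

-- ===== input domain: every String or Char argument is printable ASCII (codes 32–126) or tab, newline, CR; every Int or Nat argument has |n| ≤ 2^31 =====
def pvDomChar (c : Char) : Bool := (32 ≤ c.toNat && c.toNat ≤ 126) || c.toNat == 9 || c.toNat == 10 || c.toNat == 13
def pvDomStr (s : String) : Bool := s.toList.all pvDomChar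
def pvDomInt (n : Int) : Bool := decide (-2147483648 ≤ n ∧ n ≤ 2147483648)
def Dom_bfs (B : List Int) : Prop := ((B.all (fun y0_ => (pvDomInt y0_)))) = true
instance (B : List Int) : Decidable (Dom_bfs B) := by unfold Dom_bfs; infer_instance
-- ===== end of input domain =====

-- B replaces A's breadth-first search over whole array states (queue + visited dict) by
-- iterative deepening over the total number of decrements, testing each budget L with a
-- DFS over the compositions of L among the elements (objective: alternative; it trades
-- A's n^L state enumeration with tuple/dict bookkeeping for a memoryless composition search).

-- ===== PORT A =====
-- FLAG = B[0] & B[1]; for i in range(2, len(B)): FLAG &= B[i]   (no early exit)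
def andRest (flag : Int) (rest : List Int) : Int :=
  match rest with
  | [] => flag
  | x :: xs => andRest (PySem.Int.band flag x) xs

-- inner success test after a decrement: checks FLAG == 0 after B[0]&B[1] and after each further &=
def hitsZero (flag : Int) (rest : List Int) : Bool :=
  if flag = 0 then true
  else
    match rest with
    | [] => false
    | x :: xs => hitsZero (PySem.Int.band flag x) xs

-- the body of "for i in range(len(B))" for one popped state: pre ++ suf is the state,
-- i walks suf; B[i] -= 1 / += 1 is modelled by rebuilding pre ++ (x-1) :: xs.
def procA (cnt : Int) (pre suf : List Int) (next : List (List Int))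
    (vis : PySem.Dict (List Int) Int) : Option Int × List (List Int) × PySem.Dict (List Int) Int :=
  match suf with
  | [] => (none, next, vis)
  | x :: xs =>
    let t := pre ++ (x - 1) :: xs
    match t with
    | b0 :: b1 :: rest =>
      if hitsZero (PySem.Int.band b0 b1) rest then (some (cnt + 1), next, vis)
      else procA cnt (pre ++ [x]) xs (next ++ [t]) (vis.insert t (cnt + 1))
    | _ => (none, next, vis)   -- IndexError in Python (state shorter than 2); unreachable under Pre_

-- the "while q:" loop; the deque is the two-list queue cur ++ next (pops from cur,
-- appends to next).  fuel only guards totality: Python loops forever on the inputs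
-- Pre_ excludes, and Pre_ guarantees the fuel below is never exhausted.
def loopA (fuel : Nat) (cur next : List (List Int)) (vis : PySem.Dict (List Int) Int) : Int :=
  match fuel, cur with
  | 0, _ => 0
  | fuel' + 1, [] =>
    match next with
    | [] => 0        -- queue exhausted: Python would fall off the loop (returns None); unreachable under Pre_
    | _ :: _ => loopA fuel' next [] vis
  | fuel' + 1, t :: rest =>
    let cnt := vis.getD t 0     -- visited[B]; the key is always present (every queued tuple was inserted)
    match procA cnt [] t next vis with
    | (some r, _, _) => r
    | (none, next', vis') => loopA (fuel' + 1) rest next' vis'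
termination_by (fuel, cur.length)
decreasing_by
  · exact Prod.Lex.left _ _ (by omega)
  · exact Prod.Lex.right _ (by simp)

def fuelOf (B : List Int) : Nat := (B.map Int.natAbs).sum + 2

def bfs (B : List Int) : Int :=
  match B with
  | b0 :: b1 :: rest =>
    let flag := andRest (PySem.Int.band b0 b1) rest
    if flag = 0 then 0
    else loopA (fuelOf B) [B] [] ((PySem.Dict.empty).insert B 0)
  | _ => 0   -- Python raises IndexError on B[0]/B[1] (fewer than 2 elements); excluded by Pre_

-- ===== PORT B =====
-- feasible(i, budget, acc): can elements i.. absorb exactly `budget` decrements so that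
-- acc & (decremented elements) == 0 ?  (list recursion replaces the index i)
def feasAlt (xs : List Int) (budget acc : Int) : Bool :=
  match xs with
  | [] => budget == 0 && acc == 0
  | x :: rest =>
    (PySem.List.pyRange 0 (budget + 1) 1).any
      (fun d => feasAlt rest (budget - d) (PySem.Int.band acc (x - d)))

def fuelOfAlt (B : List Int) : Nat := (B.map Int.natAbs).sum + 2

-- "L = 0; while True: if feasible(0, L, -1): return L; L += 1"; fuel = totality guard only.
def loopB (fuel : Nat) (B : List Int) (L : Int) : Int :=
  match fuel with
  | 0 => 0
  | f + 1 => if feasAlt B L (-1) then L else loopB f B (L + 1)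

def bfs_alt (B : List Int) : Int := loopB (fuelOfAlt B) B 0

-- ===== PRECONDITION & SPEC =====
-- Pre_ excludes exactly the inputs where Python's A does not return: fewer than 2 elements
-- (IndexError on B[0] & B[1]) and all-negative lists (the AND stays negative, the BFS never ends).
def Pre_bfs (B : List Int) : Prop := 2 ≤ B.length ∧ ∃ x ∈ B, 0 ≤ x
instance (B : List Int) : Decidable (Pre_bfs B) := by unfold Pre_bfs; infer_instance

def pvWitness_bfs : List Int := [3, 5]

def Spec_bfs (B : List Int) (out : Int) : Prop := out = bfs_alt B
instance (B : List Int) (out : Int) : Decidable (Spec_bfs B out) := by unfold Spec_bfs; infer_instance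

-- ===== CLAIM (what is proved, stated in full; the proofs are below) =====
def Claim_equal_bfs : Prop := ∀ (B : List Int), Dom_bfs B → Pre_bfs B → Spec_bfs B (bfs B)

-- ===== LEMMAS AND PROOFS =====

-- full AND of a state, seeded with Python's -1 identity
def isZero (t : List Int) : Bool := andRest (-1) t = 0

-- all single-position decrements of t, in Python's i = 0..n-1 order
def succL (t : List Int) : List (List Int) :=
  match t with
  | [] => []
  | x :: xs => ((x - 1) :: xs) :: (succL xs).map (fun u => x :: u)

-- k further breadth-first layers from a frontier
def iterFlat (l : List (List Int)) : Nat → List (List Int)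
  | 0 => l
  | k + 1 => (iterFlat l k).flatMap succL

lemma andRest_zero (l : List Int) : andRest 0 l = 0 := by
  induction l with
  | nil => rfl
  | cons x xs ih =>
    simpa [andRest, PySem.Int.band_comm 0 x, PySem.Int.band_zero] using ih

lemma hitsZero_eq (rest : List Int) : ∀ flag, hitsZero flag rest = decide (andRest flag rest = 0) := by
  induction rest with
  | nil => intro flag; by_cases h : flag = 0 <;> simp [hitsZero, andRest, h]
  | cons x xs ih =>
    intro flag
    by_cases h : flag = 0
    · simp [hitsZero, h, andRest, andRest_zero, PySem.Int.band_comm 0 x, PySem.Int.band_zero]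
    · simp [hitsZero, h, andRest, ih]

lemma andRest_neg_one_cons_cons (b0 b1 : Int) (rest : List Int) :
    andRest (-1) (b0 :: b1 :: rest) = andRest (PySem.Int.band b0 b1) rest := by
  simp [andRest, PySem.Int.band_comm (-1) b0, PySem.Int.band_neg_one]

lemma andRest_zero_mem (t : List Int) (h : (0 : Int) ∈ t) (a : Int) : andRest a t = 0 := by
  induction t generalizing a with
  | nil => simp at h
  | cons x xs ih =>
    rcases List.mem_cons.mp h with h0 | h0
    · subst h0; simp [andRest, PySem.Int.band_zero, andRest_zero]
    · exact ih h0 _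

lemma succL_length_sum (t : List Int) : ∀ u ∈ succL t, u.length = t.length ∧ u.sum = t.sum - 1 := by
  induction t with
  | nil => intro u hu; simp [succL] at hu
  | cons x xs ih =>
    intro u hu
    rcases List.mem_cons.mp hu with h0 | h0
    · subst h0; constructor <;> simp <;> ring
    · rcases List.mem_map.mp h0 with ⟨w, hw, rfl⟩
      have := ih w hw
      constructor <;> simp [this.1, this.2] <;> ring

def insList (vis : PySem.Dict (List Int) Int) (l : List (List Int)) (v : Int) :
    PySem.Dict (List Int) Int :=
  l.foldl (fun d t => d.insert t v) vis

lemma exists_cons_cons (t : List Int) (h : 2 ≤ t.length) :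
    ∃ b0 b1 rest, t = b0 :: b1 :: rest := by
  match t with
  | b0 :: b1 :: rest => exact ⟨b0, b1, rest, rfl⟩
  | [] => simp at h
  | [b0] => simp at h

lemma hitsZero_isZero (b0 b1 : Int) (rest : List Int) :
    hitsZero (PySem.Int.band b0 b1) rest = isZero (b0 :: b1 :: rest) := by
  rw [hitsZero_eq]; simp [isZero, andRest_neg_one_cons_cons]

lemma succL_map_cons (pre : List Int) (x : Int) (xs : List Int) :
    ((succL (x :: xs)).map (fun u => pre ++ u)) =
      (pre ++ (x - 1) :: xs) :: ((succL xs).map (fun u => (pre ++ [x]) ++ u)) := by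
  simp [succL, List.map_map, Function.comp_def, List.append_assoc]

lemma procA_found (suf : List Int) : ∀ pre cnt next vis,
    2 ≤ pre.length + suf.length →
    ((succL suf).map (fun u => pre ++ u)).any isZero = true →
    (procA cnt pre suf next vis).1 = some (cnt + 1) := by
  induction suf with
  | nil => intro pre cnt next vis _ hany; simp [succL] at hany
  | cons x xs ih =>
    intro pre cnt next vis hlen hany
    rcases exists_cons_cons (pre ++ (x - 1) :: xs) (by simp only [List.length_append, List.length_cons] at hlen ⊢; omega) with ⟨b0, b1, rest, ht⟩
    rw [succL_map_cons] at hany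
    unfold procA
    rw [ht]
    simp only [List.any_cons, Bool.or_eq_true] at hany
    by_cases hz : hitsZero (PySem.Int.band b0 b1) rest
    · simp [hz]
    · have h1 : isZero (pre ++ (x - 1) :: xs) = false := by
        rw [ht, ← hitsZero_isZero]; exact Bool.not_eq_true _ ▸ by simpa using hz
      simp only [hz, if_false]
      apply ih
      · simp at hlen ⊢; omega
      · rcases hany with h | h
        · rw [h1] at h; exact absurd h (by simp)
        · exact h

lemma procA_none (suf : List Int) : ∀ pre cnt next vis,
    2 ≤ pre.length + suf.length →
    ((succL suf).map (fun u => pre ++ u)).any isZero = false →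
    procA cnt pre suf next vis =
      (none, next ++ (succL suf).map (fun u => pre ++ u),
        insList vis ((succL suf).map (fun u => pre ++ u)) (cnt + 1)) := by
  induction suf with
  | nil => intro pre cnt next vis _ _; simp [procA, succL, insList]
  | cons x xs ih =>
    intro pre cnt next vis hlen hany
    rcases exists_cons_cons (pre ++ (x - 1) :: xs) (by simp only [List.length_append, List.length_cons] at hlen ⊢; omega) with ⟨b0, b1, rest, ht⟩
    rw [succL_map_cons] at hany ⊢
    simp only [List.any_cons, Bool.or_eq_false_iff] at hany
    have hz : hitsZero (PySem.Int.band b0 b1) rest = false := by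
      rw [hitsZero_isZero, ← ht]; exact hany.1
    unfold procA
    rw [ht]
    simp only [hz, if_false, Bool.false_eq_true]
    rw [← ht]
    have := ih (pre ++ [x]) cnt (next ++ [pre ++ (x - 1) :: xs])
      (vis.insert (pre ++ (x - 1) :: xs) (cnt + 1)) (by simp at hlen ⊢; omega) hany.2
    rw [this]
    simp [insList, List.append_assoc]

lemma contains_insList (l : List (List Int)) : ∀ (vis : PySem.Dict (List Int) Int) (v : Int)
    (t : List Int), (vis.contains t = true ∨ t ∈ l) → (insList vis l v).contains t = true := by
  induction l with
  | nil => intro vis v t h; simpa [insList] using h.resolve_right (by simp)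
  | cons a as ih =>
    intro vis v t h
    have : insList vis (a :: as) v = insList (vis.insert a v) as v := rfl
    rw [this]
    rcases h with h | h
    · exact ih _ _ _ (Or.inl (by simp [PySem.Dict.contains_insert, h]))
    · rcases List.mem_cons.mp h with rfl | h
      · exact ih _ _ _ (Or.inl (by simp [PySem.Dict.contains_insert_self]))
      · exact ih _ _ _ (Or.inr h)

lemma get?_insList (l : List (List Int)) : ∀ (vis : PySem.Dict (List Int) Int) (v : Int)
    (t : List Int) (w : Int), (insList vis l v).get? t = some w →
    vis.get? t = some w ∨ (t ∈ l ∧ w = v) := by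
  induction l with
  | nil => intro vis v t w h; exact Or.inl (by simpa [insList] using h)
  | cons a as ih =>
    intro vis v t w h
    have h' : (insList (vis.insert a v) as v).get? t = some w := h
    rcases ih _ _ _ _ h' with h2 | h2
    · by_cases hta : t = a
      · subst hta
        rw [PySem.Dict.get?_insert_self] at h2
        exact Or.inr ⟨by simp, (Option.some.injEq _ _).mp h2.symm |>.symm ▸ by
          cases h2; rfl⟩
      · rw [PySem.Dict.get?_insert_of_ne _ _ hta] at h2
        exact Or.inl h2
    · exact Or.inr ⟨List.mem_cons_of_mem _ h2.1, h2.2⟩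

lemma iterFlat_shift (l : List (List Int)) (k : Nat) :
    iterFlat (l.flatMap succL) k = iterFlat l (k + 1) := by
  induction k with
  | zero => rfl
  | succ k ih => simp [iterFlat, ih]

lemma iterFlat_nil (k : Nat) : iterFlat [] k = [] := by
  induction k with
  | zero => rfl
  | succ k ih => simp [iterFlat, ih]

-- the main characterisation of A's loop
lemma loopA_eq (f : Nat) : ∀ (cur next : List (List Int)) (vis : PySem.Dict (List Int) Int)
    (c m n : Nat) (S0 : Int),
    2 ≤ n →
    (∀ t ∈ cur, t.length = n ∧ t.sum = S0 - (c : Int)) →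
    (∀ t ∈ next, t.length = n ∧ t.sum = S0 - (c : Int) - 1) →
    (∀ t v, vis.get? t = some v → v = S0 - t.sum) →
    (∀ t, t ∈ cur ∨ t ∈ next → vis.contains t = true) →
    (∀ t ∈ next, isZero t = false) →
    (∀ j < m, (iterFlat (next ++ cur.flatMap succL) j).any isZero = false) →
    ((iterFlat (next ++ cur.flatMap succL) m).any isZero = true) →
    m + 1 ≤ f →
    loopA f cur next vis = (c : Int) + m + 1 := by
  induction f with
  | zero => intro cur next vis c m n S0 _ _ _ _ _ _ _ _ hf; omega
  | succ f ihf =>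
    intro cur
    induction cur with
    | nil =>
      intro next vis c m n S0 hn hcur hnext hvis hcont hnz hmin hm hf
      match next with
      | [] =>
        rw [show ([] : List (List Int)) ++ List.flatMap succL [] = [] by simp] at hm
        rw [iterFlat_nil] at hm
        simp at hm
      | h :: tl =>
        have hstep : loopA (f + 1) [] (h :: tl) vis = loopA f (h :: tl) [] vis := by
          rw [loopA]
        rw [hstep]
        have hm1 : 1 ≤ m := by
          rcases Nat.eq_zero_or_pos m with rfl | h1
          · rw [show (h :: tl) ++ List.flatMap succL [] = h :: tl by simp] at hm
            simp only [iterFlat] at hm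
            rcases List.any_eq_true.mp hm with ⟨t, ht, hz⟩
            rw [hnz t ht] at hz; simp at hz
          · exact h1
        obtain ⟨m', rfl⟩ : ∃ m', m = m' + 1 := ⟨m - 1, by omega⟩
        have key := ihf (h :: tl) [] vis (c + 1) m' n S0 hn
          (fun t ht => by
            have := hnext t ht
            refine ⟨this.1, ?_⟩
            rw [this.2]; push_cast; ring)
          (by simp)
          hvis
          (fun t ht => hcont t (Or.inr (ht.resolve_right (by simp))))
          (by simp)
          (fun j hj => by
            rw [show ([] : List (List Int)) ++ List.flatMap succL (h :: tl) = List.flatMap succL (h :: tl) by simp]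
            rw [iterFlat_shift]
            have := hmin (j + 1) (by omega)
            rwa [show (h :: tl) ++ List.flatMap succL [] = h :: tl by simp] at this)
          (by
            rw [show ([] : List (List Int)) ++ List.flatMap succL (h :: tl) = List.flatMap succL (h :: tl) by simp]
            rw [iterFlat_shift]
            rwa [show (h :: tl) ++ List.flatMap succL [] = h :: tl by simp] at hm)
          (by omega)
        rw [key]; push_cast; ring
    | cons t rest ihc =>
      intro next vis c m n S0 hn hcur hnext hvis hcont hnz hmin hm hf
      obtain ⟨htlen, htsum⟩ := hcur t (by simp)
      -- the visited lookup returns the level c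
      have hcontt : vis.contains t = true := hcont t (Or.inl (by simp))
      have hsome : (vis.get? t).isSome := by
        rw [← PySem.Dict.contains_eq_isSome_get?]; exact hcontt
      obtain ⟨v, hv⟩ := Option.isSome_iff_exists.mp hsome
      have hvc : v = (c : Int) := by
        have := hvis t v hv
        rw [htsum] at this; omega
      have hgetD : vis.getD t 0 = (c : Int) := by
        rw [PySem.Dict.getD_eq_get?_getD, hv, hvc]; rfl
      have hmap : ((succL t).map (fun u => ([] : List Int) ++ u)) = succL t := by simp
      by_cases hfound : (succL t).any isZero = true
      · -- a successor of t hits AND == 0: Python returns cnt + 1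
        have hm0 : m = 0 := by
          by_contra hne
          have h0 := hmin 0 (by omega)
          simp only [iterFlat, List.flatMap_cons, List.any_append] at h0
          rcases Bool.or_eq_false_iff.mp h0 with ⟨_, h2⟩
          rcases Bool.or_eq_false_iff.mp h2 with ⟨h3, _⟩
          rw [hfound] at h3; simp at h3
        have h1 := procA_found t [] (vis.getD t 0) next vis (by simpa [htlen] using hn)
          (by rwa [hmap])
        rcases hp : procA (vis.getD t 0) [] t next vis with ⟨o, nx, vs⟩
        rw [hp] at h1
        simp only at h1
        subst h1
        rw [loopA, hp]
        simp only [hgetD, hm0]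
        push_cast; ring
      · have hfound' : (succL t).any isZero = false := by
          revert hfound; cases h : (succL t).any isZero <;> simp
        have hpn := procA_none t [] (vis.getD t 0) next vis (by simpa [htlen] using hn)
          (by rwa [hmap])
        rw [hmap] at hpn
        rw [loopA, hpn]
        simp only
        have hsuccmem : ∀ u ∈ succL t, u.length = n ∧ u.sum = S0 - (c : Int) - 1 := by
          intro u hu
          obtain ⟨h1, h2⟩ := succL_length_sum t u hu
          exact ⟨h1 ▸ htlen, by rw [h2, htsum]⟩
        have key := ihc (next ++ succL t) (insList vis (succL t) (vis.getD t 0 + 1)) c m n S0 hn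
          (fun u hu => hcur u (by simp [hu]))
          (fun u hu => by
            rcases List.mem_append.mp hu with h | h
            · exact hnext u h
            · exact hsuccmem u h)
          (fun u w hw => by
            rcases get?_insList (succL t) vis (vis.getD t 0 + 1) u w hw with h | h
            · exact hvis u w h
            · obtain ⟨h1, h2⟩ := h
              rw [h2, hgetD, (hsuccmem u h1).2]; ring)
          (fun u hu => by
            apply contains_insList
            rcases hu with h | h
            · exact Or.inl (hcont u (Or.inl (by simp [h])))
            · rcases List.mem_append.mp h with h | h
              · exact Or.inl (hcont u (Or.inr h))
              · exact Or.inr h)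
          (fun u hu => by
            rcases List.mem_append.mp hu with h | h
            · exact hnz u h
            · simpa using (List.any_eq_false.mp hfound') u h)
          (fun j hj => by
            rw [show (next ++ succL t) ++ List.flatMap succL rest
                = next ++ List.flatMap succL (t :: rest) by simp [List.flatMap_cons]]
            exact hmin j hj)
          (by
            rw [show (next ++ succL t) ++ List.flatMap succL rest
                = next ++ List.flatMap succL (t :: rest) by simp [List.flatMap_cons]]
            exact hm)
          hf
        exact key

-- B side
lemma feasAlt_iff (xs : List Int) : ∀ (budget acc : Int),
    feasAlt xs budget acc = true ↔
      ∃ ds : List Int, ds.length = xs.length ∧ (∀ d ∈ ds, 0 ≤ d) ∧ ds.sum = budget ∧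
        andRest acc (List.zipWith (· - ·) xs ds) = 0 := by
  induction xs with
  | nil =>
    intro b a
    constructor
    · intro h
      simp [feasAlt] at h
      exact ⟨[], rfl, by simp, by simp [h.1.symm], by simpa [andRest] using h.2⟩
    · rintro ⟨ds, hlen, _, hsum, hand⟩
      rcases List.length_eq_zero_iff.mp hlen with rfl
      simp at hsum
      simp [feasAlt, hsum.symm]
      simpa [andRest] using hand
  | cons x rest ih =>
    intro b a
    rw [feasAlt, List.any_eq_true]
    constructor
    · rintro ⟨d, hd, hf⟩
      rw [PySem.List.mem_pyRange_one] at hd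
      rcases (ih _ _).mp hf with ⟨ds', h1, h2, h3, h4⟩
      refine ⟨d :: ds', by simp [h1], ?_, by simp [h3]; try ring, ?_⟩
      · intro e he; rcases List.mem_cons.mp he with rfl | he
        · exact hd.1
        · exact h2 e he
      · simpa [andRest] using h4
    · rintro ⟨ds, hlen, hnn, hsum, hand⟩
      match ds, hlen with
      | d :: ds', hlen =>
        have hd : 0 ≤ d := hnn d (by simp)
        have hnn' : ∀ e ∈ ds', 0 ≤ e := fun e he => hnn e (by simp [he])
        have hs' : 0 ≤ ds'.sum := List.sum_nonneg hnn'
        have hsum' : ds'.sum = b - d := by simp at hsum; omega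
        refine ⟨d, PySem.List.mem_pyRange_one.mpr ⟨hd, by omega⟩, (ih _ _).mpr
          ⟨ds', by simpa using hlen, hnn', hsum', by simpa [andRest] using hand⟩⟩

lemma loopB_eq (f : Nat) : ∀ (B : List Int) (L : Int) (m : Nat),
    (∀ j < m, feasAlt B (L + (j : Int)) (-1) = false) →
    feasAlt B (L + (m : Int)) (-1) = true →
    m + 1 ≤ f →
    loopB f B L = L + (m : Int) := by
  induction f with
  | zero => intro B L m _ _ hf; omega
  | succ f ihf =>
    intro B L m hmin htrue hf
    match m with
    | 0 =>
      have h : feasAlt B L (-1) = true := by simpa using htrue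
      rw [loopB, h]; simp
    | m + 1 =>
      have h0 : feasAlt B L (-1) = false := by simpa using hmin 0 (by omega)
      rw [loopB, h0]
      simp only [Bool.false_eq_true, if_false]
      have key : loopB f B (L + 1) = (L + 1) + (m : Int) := by
        apply ihf
        · intro j hj
          have h := hmin (j + 1) (by omega)
          have e : L + 1 + (j : Int) = L + ((j : Int) + 1) := by ring
          rw [e]; push_cast at h; exact h
        · have e : L + 1 + (m : Int) = L + ((m : Int) + 1) := by ring
          rw [e]; push_cast at htrue; exact htrue
        · omega
      rw [key]; push_cast; ring

-- bridge: layer k of the BFS tree = decrement vectors of total k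
lemma zipWith_sub_zeros (B : List Int) : ∀ ds, ds.length = B.length → (∀ d ∈ ds, 0 ≤ d) →
    ds.sum = 0 → List.zipWith (· - ·) B ds = B := by
  induction B with
  | nil => intro ds _ _ _; simp
  | cons x xs ih =>
    rintro (_ | ⟨d, dt⟩) hlen hnn hsum
    · exact absurd hlen (by simp)
    · have hd : 0 ≤ d := hnn d (by simp)
      have hnn' : ∀ e ∈ dt, 0 ≤ e := fun e he => hnn e (by simp [he])
      have hs' : 0 ≤ dt.sum := List.sum_nonneg hnn'
      simp at hsum hlen
      have hd0 : d = 0 := by omega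
      have hdt : dt.sum = 0 := by omega
      simp [hd0, ih dt hlen hnn' hdt]

lemma succ_vec_fwd (B : List Int) : ∀ ds, ds.length = B.length → (∀ d ∈ ds, 0 ≤ d) →
    ∀ u ∈ succL (List.zipWith (· - ·) B ds),
      ∃ ds', ds'.length = B.length ∧ (∀ d ∈ ds', 0 ≤ d) ∧ ds'.sum = ds.sum + 1 ∧
        u = List.zipWith (· - ·) B ds' := by
  induction B with
  | nil => intro ds hlen _ u hu; rcases List.length_eq_zero_iff.mp (by simpa using hlen) with rfl; simp [succL] at hu
  | cons x xs ih =>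
    rintro (_ | ⟨d, dt⟩) hlen hnn u hu
    · simp at hlen
    · have hnn' : ∀ e ∈ dt, 0 ≤ e := fun e he => hnn e (by simp [he])
      simp only [List.zipWith_cons_cons, succL] at hu
      rcases List.mem_cons.mp hu with rfl | hu
      · refine ⟨(d + 1) :: dt, by simpa using hlen, ?_, by simp; try ring, by simp; try ring⟩
        intro e he; rcases List.mem_cons.mp he with rfl | he
        · have := hnn d (by simp); omega
        · exact hnn' e he
      · rcases List.mem_map.mp hu with ⟨w, hw, rfl⟩
        rcases ih dt (by simpa using hlen) hnn' w hw with ⟨dt', h1, h2, h3, rfl⟩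
        refine ⟨d :: dt', by simpa using h1, ?_, by simp [h3]; try ring, by simp⟩
        intro e he; rcases List.mem_cons.mp he with rfl | he
        · exact hnn e (by simp)
        · exact h2 e he

lemma succ_vec_bwd (B : List Int) : ∀ ds', ds'.length = B.length → (∀ d ∈ ds', 0 ≤ d) →
    1 ≤ ds'.sum →
    ∃ ds, ds.length = B.length ∧ (∀ d ∈ ds, 0 ≤ d) ∧ ds.sum = ds'.sum - 1 ∧
      List.zipWith (· - ·) B ds' ∈ succL (List.zipWith (· - ·) B ds) := by
  induction B with
  | nil =>
    intro ds' hlen _ hsum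
    rcases List.length_eq_zero_iff.mp (by simpa using hlen) with rfl
    simp at hsum
  | cons x xs ih =>
    rintro (_ | ⟨d, dt⟩) hlen hnn hsum
    · simp at hlen
    · have hd : 0 ≤ d := hnn d (by simp)
      have hnn' : ∀ e ∈ dt, 0 ≤ e := fun e he => hnn e (by simp [he])
      by_cases hd1 : 1 ≤ d
      · refine ⟨(d - 1) :: dt, by simpa using hlen, ?_, by simp; try ring, ?_⟩
        · intro e he; rcases List.mem_cons.mp he with rfl | he
          · omega
          · exact hnn' e he
        · simp only [List.zipWith_cons_cons, succL]
          have e : x - d = x - (d - 1) - 1 := by ring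
          rw [e]
          exact List.Mem.head _
      · have hd0 : d = 0 := by omega
        have hsum' : 1 ≤ dt.sum := by simp at hsum; omega
        rcases ih dt (by simpa using hlen) hnn' hsum' with ⟨dt0, h1, h2, h3, h4⟩
        refine ⟨0 :: dt0, by simpa using h1, ?_, by simp [h3, hd0]; try ring, ?_⟩
        · intro e he; rcases List.mem_cons.mp he with rfl | he
          · omega
          · exact h2 e he
        · simp only [List.zipWith_cons_cons, succL, hd0]
          exact List.mem_cons_of_mem _ (List.mem_map.mpr ⟨_, h4, by simp⟩)

lemma mem_iterFlat (B : List Int) : ∀ (k : Nat) (t : List Int),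
    t ∈ iterFlat [B] k ↔
      ∃ ds : List Int, ds.length = B.length ∧ (∀ d ∈ ds, 0 ≤ d) ∧ ds.sum = (k : Int) ∧
        t = List.zipWith (· - ·) B ds := by
  intro k
  induction k with
  | zero =>
    intro t
    constructor
    · intro ht
      have hB : t = B := by simpa [iterFlat] using ht
      subst hB
      exact ⟨List.replicate t.length 0, by simp, by simp, by simp, by
        rw [zipWith_sub_zeros t _ (by simp) (by simp) (by simp)]⟩
    · rintro ⟨ds, h1, h2, h3, rfl⟩
      simp [iterFlat, zipWith_sub_zeros B ds h1 h2 (by simpa using h3)]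
  | succ k ih =>
    intro t
    rw [show iterFlat [B] (k + 1) = (iterFlat [B] k).flatMap succL from rfl, List.mem_flatMap]
    constructor
    · rintro ⟨s, hs, hts⟩
      rcases (ih s).mp hs with ⟨ds, h1, h2, h3, rfl⟩
      rcases succ_vec_fwd B ds h1 h2 t hts with ⟨ds', g1, g2, g3, g4⟩
      exact ⟨ds', g1, g2, by rw [g3, h3]; push_cast; ring, g4⟩
    · rintro ⟨ds', h1, h2, h3, rfl⟩
      have hsum1 : 1 ≤ ds'.sum := by rw [h3]; push_cast; omega
      rcases succ_vec_bwd B ds' h1 h2 hsum1 with ⟨ds, g1, g2, g3, g4⟩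
      exact ⟨_, (ih _).mpr ⟨ds, g1, g2, by rw [g3, h3]; push_cast; ring, rfl⟩, g4⟩

lemma anyZero_eq_feas (B : List Int) (k : Nat) :
    ((iterFlat [B] k).any isZero = true) ↔ feasAlt B (k : Int) (-1) = true := by
  rw [feasAlt_iff, List.any_eq_true]
  constructor
  · rintro ⟨t, ht, hz⟩
    rcases (mem_iterFlat B k t).mp ht with ⟨ds, h1, h2, h3, h4⟩
    exact ⟨ds, h1, h2, h3, by simpa [isZero, h4] using hz⟩
  · rintro ⟨ds, h1, h2, h3, h4⟩
    exact ⟨_, (mem_iterFlat B k _).mpr ⟨ds, h1, h2, h3, rfl⟩, by simpa [isZero] using h4⟩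

lemma isZero_B_eq (b0 b1 : Int) (rest : List Int) :
    isZero (b0 :: b1 :: rest) = decide (andRest (PySem.Int.band b0 b1) rest = 0) := by
  simp [isZero, andRest_neg_one_cons_cons]

lemma feas_of_mem_nonneg (B : List Int) (x : Int) (hxB : x ∈ B) (hx : 0 ≤ x) :
    feasAlt B x (-1) = true := by
  obtain ⟨p, q, rfl⟩ := List.append_of_mem hxB
  rw [feasAlt_iff]
  refine ⟨List.replicate p.length 0 ++ x :: List.replicate q.length 0, by simp, ?_, by simp, ?_⟩
  · intro d hd
    rcases List.mem_append.mp hd with h | h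
    · rw [List.eq_of_mem_replicate h]
    · rcases List.mem_cons.mp h with rfl | h
      · exact hx
      · rw [List.eq_of_mem_replicate h]
  · rw [List.zipWith_append (by simp)]
    have h1 : List.zipWith (· - ·) p (List.replicate p.length 0) = p :=
      zipWith_sub_zeros p _ (by simp) (by simp) (by simp)
    have h2 : List.zipWith (· - ·) (x :: q) (x :: List.replicate q.length 0) = (0 : Int) :: q := by
      simp only [List.zipWith_cons_cons]
      rw [zipWith_sub_zeros q _ (by simp) (by simp) (by simp)]
      simp
    rw [h1, h2]
    exact andRest_zero_mem _ (by simp) _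

lemma natAbs_le_fuelSum (B : List Int) (x : Int) (hxB : x ∈ B) :
    x.natAbs ≤ (B.map Int.natAbs).sum :=
  List.single_le_sum (fun a _ => Nat.zero_le a) _ (List.mem_map_of_mem hxB)

-- ===== VERDICT (by name: the statement is the Claim_ definition above) =====
theorem bfs_spec : Claim_equal_bfs := by
  intro B _ hpre
  obtain ⟨hlen, x, hxB, hx⟩ := hpre
  unfold Spec_bfs
  match B, hlen with
  | b0 :: b1 :: rest, _ =>
  have hlen2 : 2 ≤ (b0 :: b1 :: rest).length := by simp
  by_cases h0 : andRest (PySem.Int.band b0 b1) rest = 0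
  · -- initial AND is already 0: both return 0
    have hA : bfs (b0 :: b1 :: rest) = 0 := by simp [bfs, h0]
    have hfeas0 : feasAlt (b0 :: b1 :: rest) ((0 : Int) + ((0 : Nat) : Int)) (-1) = true := by
      have := (anyZero_eq_feas (b0 :: b1 :: rest) 0).mp
        (by simp [iterFlat, isZero_B_eq, h0])
      simpa using this
    have hB : bfs_alt (b0 :: b1 :: rest) = 0 := by
      unfold bfs_alt
      have := loopB_eq (fuelOfAlt (b0 :: b1 :: rest)) (b0 :: b1 :: rest) 0 0
        (fun j hj => by omega) hfeas0 (by unfold fuelOfAlt; omega)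
      simpa using this
    rw [hA, hB]
  · -- initial AND nonzero: both return the least number of decrements
    set BB := b0 :: b1 :: rest with hBB
    have hne : isZero BB = false := by
      rw [hBB, isZero_B_eq]; simpa using h0
    have hxpos : feasAlt BB ((x.natAbs : Nat) : Int) (-1) = true := by
      rw [Int.natAbs_of_nonneg hx]; exact feas_of_mem_nonneg BB x hxB hx
    have hex : ∃ k, (iterFlat [BB] k).any isZero = true :=
      ⟨x.natAbs, (anyZero_eq_feas BB x.natAbs).mpr hxpos⟩
    set m := Nat.find hex with hm
    have hPm : (iterFlat [BB] m).any isZero = true := Nat.find_spec hex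
    have hminP : ∀ j < m, (iterFlat [BB] j).any isZero = false := by
      intro j hj
      have := Nat.find_min hex hj
      simpa using this
    have hm1 : 1 ≤ m := by
      rcases Nat.eq_zero_or_pos m with h | h
      · exfalso
        rw [h] at hPm
        simp only [iterFlat, List.any_cons, List.any_nil, Bool.or_false] at hPm
        rw [hne] at hPm; simp at hPm
      · exact h
    have hmle : m ≤ x.natAbs := Nat.find_min' hex ((anyZero_eq_feas BB x.natAbs).mpr hxpos)
    have hmsum : m ≤ (BB.map Int.natAbs).sum := le_trans hmle (natAbs_le_fuelSum BB x hxB)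
    obtain ⟨m', hsplit⟩ : ∃ m', m = m' + 1 := ⟨m - 1, by omega⟩
    -- A side
    have hA : bfs BB = ((0 : Nat) : Int) + (m' : Int) + 1 := by
      have hred : bfs BB = loopA (fuelOf BB) [BB] [] ((PySem.Dict.empty).insert BB 0) := by
        simp [hBB, bfs, h0]
      rw [hred]
      apply loopA_eq (fuelOf BB) [BB] [] _ 0 m' BB.length BB.sum (by simp [hBB])
      · intro t ht
        rcases (by simpa using ht : t = BB) with rfl
        exact ⟨rfl, by simp⟩
      · simp
      · intro t v hv
        rw [PySem.Dict.get?_insert] at hv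
        by_cases htB : t = BB
        · subst htB; simp at hv; omega
        · simp [htB, PySem.Dict.get?_empty] at hv
      · intro t ht
        rcases (by simpa using ht : t = BB) with rfl
        exact PySem.Dict.contains_insert_self _ _ _
      · simp
      · intro j hj
        rw [show ([] : List (List Int)) ++ List.flatMap succL [BB] = [BB].flatMap succL by simp]
        rw [iterFlat_shift]
        exact hminP (j + 1) (by omega)
      · rw [show ([] : List (List Int)) ++ List.flatMap succL [BB] = [BB].flatMap succL by simp]
        rw [iterFlat_shift]
        rw [show m' + 1 = m from hsplit.symm]
        exact hPm
      · unfold fuelOf; omega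
    -- B side
    have hB : bfs_alt BB = (0 : Int) + ((m : Nat) : Int) := by
      unfold bfs_alt
      apply loopB_eq
      · intro j hj
        have := hminP j hj
        by_contra hcon
        have htr : feasAlt BB ((0 : Int) + (j : Int)) (-1) = true := by
          revert hcon; cases hh : feasAlt BB ((0 : Int) + (j : Int)) (-1) <;> simp
        rw [show (0 : Int) + (j : Int) = ((j : Nat) : Int) by ring] at htr
        rw [(anyZero_eq_feas BB j).mpr htr] at this
        simp at this
      · have := (anyZero_eq_feas BB m).mp hPm
        rw [show (0 : Int) + ((m : Nat) : Int) = ((m : Nat) : Int) by ring]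
        exact this
      · unfold fuelOfAlt; omega
    rw [hA, hB]
    push_cast; omega
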